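-- pv_equiv track=rewrite | github.com/hexiaoweiff8/MyLeetCode | code/NC1653.py | dy
-- ===== SOURCE A (Python) =====
-- def dy(s):
--     f = countB = 0
--     for char in s:
--         if char == "b":
--             countB += 1
--         else:
--             f = min(f + 1, countB)
--     return f
-- ===== SOURCE B (Python) =====
-- def dy(s):
--     totalA = 0
--     for c in s:
--         if c != "b":
--             totalA += 1
--     best = totalA
--     prefixB = 0
--     remainingA = totalA
--     for c in s:
--         if c == "b":
--             prefixB += 1
--         else:
--             remainingA -= 1
--         cost = prefixB + remainingA
--         if cost < best:
--             best = cost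
--     return best
-- ===== Notes on version B (the rewrite author's own statement) =====
-- stated objective: alternative
-- what changed: Replaces the incremental min-DP with a split-point enumeration: one pass counts the non-'b' characters, a second sweep maintains prefix 'b'-count and remaining non-'b'-count and takes the minimum cost prefixB + remainingA over all split positions.
import Mathlib
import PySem

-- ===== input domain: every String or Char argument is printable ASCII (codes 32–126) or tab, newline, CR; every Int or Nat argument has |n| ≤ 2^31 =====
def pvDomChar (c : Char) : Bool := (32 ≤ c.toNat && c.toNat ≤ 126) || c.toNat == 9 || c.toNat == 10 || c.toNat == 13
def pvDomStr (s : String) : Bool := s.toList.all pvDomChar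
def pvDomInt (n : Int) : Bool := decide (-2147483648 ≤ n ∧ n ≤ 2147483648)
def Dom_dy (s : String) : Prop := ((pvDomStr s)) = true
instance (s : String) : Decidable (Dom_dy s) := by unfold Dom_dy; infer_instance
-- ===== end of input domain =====

-- B replaces A's incremental min-DP by counting the non-'b' characters and sweeping
-- the split positions, minimising prefixB + remainingA (alternative decomposition, same cost).

-- ===== PORT A =====
-- A's loop state: (f, countB)
def dyStepA (st : Int × Int) (c : Char) : Int × Int :=
  if c = 'b' then (st.1, st.2 + 1) else (min (st.1 + 1) st.2, st.2)

def dy (s : String) : Int := (s.toList.foldl dyStepA (0, 0)).1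

-- ===== PORT B =====
-- first pass of Source B: count the non-'b' characters
def dyCntStep (n : Int) (c : Char) : Int := if c ≠ 'b' then n + 1 else n

-- second pass of Source B: state (best, prefixB, remainingA)
def dyStepB (st : Int × Int × Int) (c : Char) : Int × Int × Int :=
  let pb := if c = 'b' then st.2.1 + 1 else st.2.1
  let ra := if c = 'b' then st.2.2 else st.2.2 - 1
  let cost := pb + ra
  (min st.1 cost, pb, ra)

def dy_alt (s : String) : Int :=
  let totalA := s.toList.foldl dyCntStep 0
  (s.toList.foldl dyStepB (totalA, 0, totalA)).1

-- ===== PRECONDITION & SPEC =====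
def Spec_dy (s : String) (out : Int) : Prop := out = dy_alt s
instance (s : String) (out : Int) : Decidable (Spec_dy s out) := by unfold Spec_dy; infer_instance

-- ===== CLAIM (what is proved, stated in full; the proofs are below) =====
def Claim_equal_dy : Prop := ∀ (s : String), Dom_dy s → Spec_dy s (dy s)

-- ===== LEMMAS AND PROOFS =====
-- number of non-'b' characters, recursively
def dyCntA : List Char → Int
  | [] => 0
  | c :: l => (if c ≠ 'b' then 1 else 0) + dyCntA l

theorem dyCnt_foldl (l : List Char) (n : Int) : l.foldl dyCntStep n = n + dyCntA l := by
  induction l generalizing n with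
  | nil => simp [dyCntA]
  | cons c l ih =>
    simp only [List.foldl, dyCntA, dyCntStep]
    rw [ih]
    split <;> ring

-- main invariant: B's best equals A's f plus the remaining non-'b' count
theorem dy_main (l : List Char) (f cb ra : Int) (h : f ≤ cb) :
    (l.foldl dyStepB (f + ra, cb, ra)).1 = (l.foldl dyStepA (f, cb)).1 + (ra - dyCntA l) := by
  induction l generalizing f cb ra with
  | nil => simp [dyCntA]
  | cons c l ih =>
    by_cases hc : c = 'b'
    · simp only [List.foldl, dyStepB, dyStepA, dyCntA, hc, ite_true]
      have hmin : min (f + ra) (cb + 1 + ra) = f + ra := by omega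
      simp only [hmin]
      have := ih f (cb + 1) ra (by omega)
      simpa [dyCntA] using this
    · simp only [List.foldl, dyStepB, dyStepA, dyCntA, if_neg hc]
      have hmin : min (f + ra) (cb + (ra - 1)) = min (f + 1) cb + (ra - 1) := by omega
      simp only [hmin]
      have := ih (min (f + 1) cb) cb (ra - 1) (by omega)
      rw [this]
      simp [hc]
      ring

-- ===== VERDICT (by name: the statement is the Claim_ definition above) =====
theorem dy_spec : Claim_equal_dy := by
  intro s _
  unfold Spec_dy dy dy_alt
  rw [dyCnt_foldl]
  have h := dy_main s.toList 0 0 (dyCntA s.toList) le_rfl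
  simp only [zero_add] at h ⊢
  rw [h]
  ring
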